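-- pv_equiv track=rewrite | github.com/Octane0411/machine.ai | src/machine_ai/agents/api_agent.py | _find_closest_player
-- ===== SOURCE A (Python) =====
-- from typing import List, Dict, Any, Optional
--
-- def _find_closest_player(target_name: str, valid_names: List[str]) -> str:
--     """Find the closest matching player name."""
--     target_lower = target_name.lower()
--
--     # Try exact match (case insensitive)
--     for name in valid_names:
--         if name.lower() == target_lower:
--             return name
--
--     # Try substring match
--     for name in valid_names:
--         if target_lower in name.lower() or name.lower() in target_lower:
--             return name
--
--     # Default to first available player
--     return valid_names[0] if valid_names else "unknown"
-- ===== SOURCE B (Python) =====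
-- def _find_closest_player(target_name, valid_names):
--     """Find the closest matching player name (single pass with fallback)."""
--     target_lower = target_name.lower()
--     first_substring = None
--     for name in valid_names:
--         nl = name.lower()
--         if nl == target_lower:
--             return name
--         if first_substring is None and (target_lower in nl or nl in target_lower):
--             first_substring = name
--     if first_substring is not None:
--         return first_substring
--     return valid_names[0] if valid_names else "unknown"
-- ===== Notes on version B (the rewrite author's own statement) =====
-- stated objective: alternative
-- what changed: The two separate scans (exact match, then substring match) are merged into one traversal that returns an exact match immediately and carries the first substring candidate as a fallback.
import Mathlib
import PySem

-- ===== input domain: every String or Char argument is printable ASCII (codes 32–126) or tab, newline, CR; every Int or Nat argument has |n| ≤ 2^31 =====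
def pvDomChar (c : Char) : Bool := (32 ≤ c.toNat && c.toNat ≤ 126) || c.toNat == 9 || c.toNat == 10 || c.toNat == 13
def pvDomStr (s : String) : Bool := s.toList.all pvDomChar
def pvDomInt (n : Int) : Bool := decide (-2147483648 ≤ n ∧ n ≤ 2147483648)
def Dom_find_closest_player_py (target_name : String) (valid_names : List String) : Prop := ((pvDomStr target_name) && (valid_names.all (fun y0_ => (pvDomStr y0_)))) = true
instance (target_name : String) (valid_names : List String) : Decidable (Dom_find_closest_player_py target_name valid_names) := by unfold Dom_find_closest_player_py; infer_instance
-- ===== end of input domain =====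

-- B merges A's two scans into one traversal that keeps a first-substring fallback (alternative decomposition, same cost).

-- ===== PORT A =====
-- two scans: first exact (case-insensitive) match, then first substring match, else head / "unknown"
def find_closest_player_py (target_name : String) (valid_names : List String) : String :=
  let target_lower := PySem.Str.lower target_name
  match valid_names.find? (fun name => PySem.Str.lower name == target_lower) with
  | some name => name
  | none =>
    match valid_names.find? (fun name =>
        PySem.Str.isIn target_lower (PySem.Str.lower name) || PySem.Str.isIn (PySem.Str.lower name) target_lower) with
    | some name => name
    | none => match valid_names with
      | [] => "unknown"
      | h :: _ => h

-- ===== PORT B =====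
-- single pass: .inl name = early return on exact match; .inr fs = loop finished with fallback fs
def fcpAltLoop (tl : String) : List String → Option String → String ⊕ Option String
  | [], fs => Sum.inr fs
  | name :: rest, fs =>
    let nl := PySem.Str.lower name
    if nl == tl then Sum.inl name
    else
      let fs' := if fs.isNone && (PySem.Str.isIn tl nl || PySem.Str.isIn nl tl) then some name else fs
      fcpAltLoop tl rest fs'

def find_closest_player_py_alt (target_name : String) (valid_names : List String) : String :=
  let target_lower := PySem.Str.lower target_name
  match fcpAltLoop target_lower valid_names none with
  | Sum.inl name => name
  | Sum.inr (some m) => m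
  | Sum.inr none => match valid_names with
    | [] => "unknown"
    | h :: _ => h

-- ===== PRECONDITION & SPEC =====
def Spec_find_closest_player_py (target_name : String) (valid_names : List String) (out : String) : Prop := out = find_closest_player_py_alt target_name valid_names
instance (target_name : String) (valid_names : List String) (out : String) : Decidable (Spec_find_closest_player_py target_name valid_names out) := by unfold Spec_find_closest_player_py; infer_instance

-- ===== CLAIM (what is proved, stated in full; the proofs are below) =====
def Claim_equal_find_closest_player_py : Prop := ∀ (target_name : String) (valid_names : List String), Dom_find_closest_player_py target_name valid_names → Spec_find_closest_player_py target_name valid_names (find_closest_player_py target_name valid_names)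

-- ===== LEMMAS AND PROOFS =====

-- the single pass equals: first exact match if any, else the carried fallback or-else the first substring match
theorem fcpAltLoop_eq (tl : String) (l : List String) (fs : Option String) :
    fcpAltLoop tl l fs =
      match l.find? (fun name => PySem.Str.lower name == tl) with
      | some n => Sum.inl n
      | none => Sum.inr (fs.or (l.find? (fun name =>
          PySem.Str.isIn tl (PySem.Str.lower name) || PySem.Str.isIn (PySem.Str.lower name) tl))) := by
  induction l generalizing fs with
  | nil => cases fs <;> simp [fcpAltLoop]
  | cons name rest ih =>
    by_cases he : (PySem.Str.lower name == tl) = true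
    · simp [fcpAltLoop, List.find?, he]
    · cases fs with
      | some m =>
        simp [fcpAltLoop, List.find?, he, ih]
      | none =>
        cases h1 : PySem.Chars.isIn tl.toList (PySem.Chars.lower name.toList) <;>
          cases h2 : PySem.Chars.isIn (PySem.Chars.lower name.toList) tl.toList <;>
            simp [fcpAltLoop, List.find?, he, h1, h2, ih]

-- ===== VERDICT (by name: the statement is the Claim_ definition above) =====
theorem find_closest_player_py_spec : Claim_equal_find_closest_player_py := by
  intro target_name valid_names _
  unfold Spec_find_closest_player_py
  simp only [find_closest_player_py, find_closest_player_py_alt, fcpAltLoop_eq, Option.none_or]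
  cases List.find? (fun name => PySem.Str.lower name == PySem.Str.lower target_name) valid_names with
  | some n => rfl
  | none =>
    cases List.find? (fun name =>
        PySem.Str.isIn (PySem.Str.lower target_name) (PySem.Str.lower name) ||
        PySem.Str.isIn (PySem.Str.lower name) (PySem.Str.lower target_name)) valid_names with
    | some m => rfl
    | none => cases valid_names <;> rfl
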